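-- pv_equiv track=rewrite | github.com/connorrohan01-afk/persona_engine | app/utils/validate.py | choose_flair
-- ===== SOURCE A (Python) =====
-- from typing import List, Dict, Any, Tuple, Optional
--
-- def choose_flair(flair_text: Optional[str], flairs: List[Dict[str, Any]]) -> Optional[str]:
--     """
--     Choose flair ID based on flair text.
--
--     Args:
--         flair_text: Requested flair text
--         flairs: Available flairs list [{id, text}, ...]
--
--     Returns:
--         Flair ID if found, None otherwise
--     """
--     if not flair_text or not flairs:
--         return None
--
--     flair_text_lower = flair_text.lower().strip()
--
--     # Try exact match first
--     for flair in flairs: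
--         if flair.get('text', '').lower().strip() == flair_text_lower:
--             return flair.get('id')
--
--     # Try partial match
--     for flair in flairs:
--         flair_lower = flair.get('text', '').lower().strip()
--         if flair_text_lower in flair_lower or flair_lower in flair_text_lower:
--             return flair.get('id')
--
--     return None
-- ===== SOURCE B (Python) =====
-- from typing import List, Dict, Any, Optional
--
--
-- def choose_flair(flair_text: Optional[str], flairs: List[Dict[str, Any]]) -> Optional[str]:
--     """Single pass: return an exact match immediately; remember the first
--     partial match and fall back to it after the loop."""
--     if not flair_text or not flairs:
--         return None
--
--     target = flair_text.lower().strip()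
--     partial_flair = None
--
--     for flair in flairs:
--         f = flair.get('text', '').lower().strip()
--         if f == target:
--             return flair.get('id')
--         if partial_flair is None and (target in f or f in target):
--             partial_flair = flair
--
--     return partial_flair.get('id') if partial_flair is not None else None
-- ===== Notes on version B (the rewrite author's own statement) =====
-- stated objective: alternative
-- what changed: Replaces A's two sequential loops over flairs (exact pass, then partial pass) with one single pass that returns an exact match immediately and remembers the first partial candidate as a fallback.
import Mathlib
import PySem

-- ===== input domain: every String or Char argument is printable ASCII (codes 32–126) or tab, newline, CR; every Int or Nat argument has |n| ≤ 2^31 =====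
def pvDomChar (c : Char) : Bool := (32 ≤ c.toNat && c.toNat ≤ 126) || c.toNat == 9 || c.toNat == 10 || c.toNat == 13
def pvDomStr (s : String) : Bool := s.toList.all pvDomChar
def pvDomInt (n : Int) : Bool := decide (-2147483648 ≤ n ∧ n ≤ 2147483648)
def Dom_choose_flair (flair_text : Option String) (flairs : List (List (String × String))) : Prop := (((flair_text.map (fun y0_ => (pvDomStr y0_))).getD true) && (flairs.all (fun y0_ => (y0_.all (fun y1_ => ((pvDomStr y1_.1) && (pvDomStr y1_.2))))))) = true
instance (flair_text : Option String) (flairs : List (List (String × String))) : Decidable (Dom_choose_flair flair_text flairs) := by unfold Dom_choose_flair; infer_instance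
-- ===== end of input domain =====

-- B replaces A's two sequential loops (exact pass, then partial pass) with one
-- single pass that returns an exact match immediately and remembers the first
-- partial candidate as a fallback (alternative decomposition, same cost).

-- shared helper: flair.get('text', '').lower().strip()  (identical expression in both Pythons)
def pvNormText (f : List (String × String)) : String :=
  PySem.Str.strip (PySem.Str.lower (PySem.Dict.getD (PySem.Dict.mk f) "text" ""))

-- flair.get('id')
def pvGetId (f : List (String × String)) : Option String :=
  PySem.Dict.get? (PySem.Dict.mk f) "id"

-- ===== PORT A =====
-- first loop: 'for flair in flairs: if … == flair_text_lower: return flair.get("id")'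
-- (some r = the loop returned r; none = fell through)
def pvExactLoop (ft : String) : List (List (String × String)) → Option (Option String)
  | [] => none
  | f :: rest =>
      if pvNormText f = ft then some (pvGetId f) else pvExactLoop ft rest

-- second loop: partial-containment test, same return convention
def pvPartialLoop (ft : String) : List (List (String × String)) → Option (Option String)
  | [] => none
  | f :: rest =>
      let fl := pvNormText f
      if PySem.Str.isIn ft fl || PySem.Str.isIn fl ft then some (pvGetId f)
      else pvPartialLoop ft rest

def choose_flair (flair_text : Option String) (flairs : List (List (String × String))) : Option String :=
  match flair_text with
  | none => none
  | some s =>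
      if s = "" ∨ flairs = [] then none
      else
        let ft := PySem.Str.strip (PySem.Str.lower s)
        match pvExactLoop ft flairs with
        | some r => r
        | none =>
            match pvPartialLoop ft flairs with
            | some r => r
            | none => none

-- ===== PORT B =====
-- the single pass, carrying the first partial-matching flair (if any) as 'pending'
def pvScanLoop (ft : String) (pending : Option (List (String × String))) :
    List (List (String × String)) → Option String
  | [] =>
      match pending with
      | some p => pvGetId p
      | none => none
  | f :: rest =>
      let fl := pvNormText f
      if fl = ft then pvGetId f
      else
        pvScanLoop ft
          (if pending.isNone && (PySem.Str.isIn ft fl || PySem.Str.isIn fl ft)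
           then some f else pending) rest

def choose_flair_alt (flair_text : Option String) (flairs : List (List (String × String))) : Option String :=
  match flair_text with
  | none => none
  | some s =>
      if s = "" ∨ flairs = [] then none
      else pvScanLoop (PySem.Str.strip (PySem.Str.lower s)) none flairs

-- ===== PRECONDITION & SPEC =====
def Spec_choose_flair (flair_text : Option String) (flairs : List (List (String × String))) (out : Option String) : Prop := out = choose_flair_alt flair_text flairs
instance (flair_text : Option String) (flairs : List (List (String × String))) (out : Option String) : Decidable (Spec_choose_flair flair_text flairs out) := by unfold Spec_choose_flair; infer_instance

-- ===== CLAIM (what is proved, stated in full; the proofs are below) =====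
def Claim_equal_choose_flair : Prop := ∀ (flair_text : Option String) (flairs : List (List (String × String))), Dom_choose_flair flair_text flairs → Spec_choose_flair flair_text flairs (choose_flair flair_text flairs)

-- ===== LEMMAS AND PROOFS =====

-- loop invariant: the single pass equals "first exact wins, else the pending
-- partial, else the first partial found ahead"
lemma pvScanLoop_eq (ft : String) (flairs : List (List (String × String))) :
    ∀ pending, pvScanLoop ft pending flairs =
      match pvExactLoop ft flairs with
      | some r => r
      | none =>
          match pending with
          | some p => pvGetId p
          | none =>
              match pvPartialLoop ft flairs with
              | some r => r
              | none => none := by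
  induction flairs with
  | nil => intro pending; cases pending <;> simp [pvScanLoop, pvExactLoop, pvPartialLoop]
  | cons f rest ih =>
      intro pending
      by_cases hex : pvNormText f = ft
      · cases pending <;>
          simp [pvScanLoop, pvExactLoop, hex]
      · cases pending <;>
          simp [pvScanLoop, pvExactLoop, pvPartialLoop, hex, ih] <;>
          cases hE : pvExactLoop ft rest <;> simp [hE] <;> split_ifs <;> simp

-- ===== VERDICT (by name: the statement is the Claim_ definition above) =====
theorem choose_flair_spec : Claim_equal_choose_flair := by
  intro flair_text flairs _
  unfold Spec_choose_flair choose_flair choose_flair_alt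
  cases flair_text with
  | none => rfl
  | some s =>
      by_cases h : s = "" ∨ flairs = []
      · simp [h]
      · simp only [h, if_false]
        rw [pvScanLoop_eq]
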